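-- pv_equiv track=rewrite | github.com/meteorlxy/binspdt | server/binary/core/algorithms/similarity/util.py | dict_to_vector
-- ===== SOURCE A (Python) =====
-- def dict_to_vector(dict_1, dict_2):
--   vector_1 = list()
--   vector_2 = list()
--   for k in dict_1.keys():
--     vector_1.append(dict_1[k])
--     if k in dict_2.keys():
--       vector_2.append(dict_2[k])
--     else:
--       vector_2.append(0)
--
--   for k in dict_2.keys():
--     if k in dict_1.keys():
--       continue
--     vector_1.append(0)
--     vector_2.append(dict_2[k])
--
--   return vector_1, vector_2
-- ===== SOURCE B (Python) =====
-- def dict_to_vector(dict_1, dict_2):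
--     # scatter algorithm: vector_1 starts as dict_1's values, vector_2 as matching zeros;
--     # stream dict_2 once, patching vector_2 in place via a key->slot index, and
--     # appending (0, v) only for dict_2-only keys.
--     vector_1 = list(dict_1.values())
--     vector_2 = [0] * len(vector_1)
--     pos = {k: i for i, k in enumerate(dict_1)}
--     for k, v in dict_2.items():
--         i = pos.get(k)
--         if i is None:
--             vector_1.append(0)
--             vector_2.append(v)
--         else:
--             vector_2[i] = v
--     return vector_1, vector_2
-- ===== Notes on version B (the rewrite author's own statement) =====
-- stated objective: alternative
-- what changed: B preallocates vector_2 as zeros aligned with dict_1's values and scatters dict_2's values into those slots in place via a precomputed key-to-index map, appending only for dict_2-only keys, instead of A's two membership-branching append loops.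
import Mathlib
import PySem

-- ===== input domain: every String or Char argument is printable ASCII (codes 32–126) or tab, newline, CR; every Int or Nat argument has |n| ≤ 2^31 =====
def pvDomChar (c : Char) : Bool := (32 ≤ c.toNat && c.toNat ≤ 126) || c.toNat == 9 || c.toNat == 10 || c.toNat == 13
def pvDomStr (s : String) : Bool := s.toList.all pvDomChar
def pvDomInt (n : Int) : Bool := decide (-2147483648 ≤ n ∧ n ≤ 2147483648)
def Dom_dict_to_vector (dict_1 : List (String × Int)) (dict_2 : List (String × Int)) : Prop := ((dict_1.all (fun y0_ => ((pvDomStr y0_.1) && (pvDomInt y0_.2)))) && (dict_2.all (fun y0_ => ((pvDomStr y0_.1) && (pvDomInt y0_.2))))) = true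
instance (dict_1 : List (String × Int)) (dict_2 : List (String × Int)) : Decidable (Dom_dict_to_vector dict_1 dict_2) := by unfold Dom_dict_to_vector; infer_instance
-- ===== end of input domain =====

-- B replaces A's two membership-branching append loops by a scatter algorithm:
-- vector_2 is preallocated as zeros aligned with dict_1's values and patched in
-- place while streaming dict_2 once (objective: alternative; same cost).

-- ===== PORT A =====
-- Port of A: first loop over dict_1's keys appends dict_1[k] and (dict_2[k] if present else 0);
-- second loop over dict_2's keys skips keys of dict_1 and appends 0 and dict_2[k].
-- dict lookup d[k] is ported as (List.lookup k d).getD 0; the default is never taken, since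
-- each loop only indexes a dict with its own keys (Python never raises here).
def dict_to_vector (dict_1 : List (String × Int)) (dict_2 : List (String × Int)) : List Int × List Int :=
  let acc := dict_1.foldl (fun (acc : List Int × List Int) kv =>
    let v1 := acc.1 ++ [(List.lookup kv.1 dict_1).getD 0]
    if (List.lookup kv.1 dict_2).isSome then
      (v1, acc.2 ++ [(List.lookup kv.1 dict_2).getD 0])
    else
      (v1, acc.2 ++ [0])) ([], [])
  dict_2.foldl (fun (acc : List Int × List Int) kv =>
    if (List.lookup kv.1 dict_1).isSome then acc
    else (acc.1 ++ [0], acc.2 ++ [(List.lookup kv.1 dict_2).getD 0])) acc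

-- ===== PORT B =====
-- Port of B: vector_1 = dict_1's values, vector_2 = [0]*len(vector_1); one loop over
-- dict_2 patches vector_2 in place at pos[k] or appends (0, v) for dict_2-only keys.
-- The dict comprehension pos = {k: i for i, k in enumerate(dict_1)} followed by pos.get(k)
-- is ported as keys1.idxOf? k: exact under Pre_ (dict_1's keys are distinct; a Python dict
-- has no duplicate keys, so this is every actual input).
def dict_to_vector_alt (dict_1 : List (String × Int)) (dict_2 : List (String × Int)) : List Int × List Int :=
  let v1 := dict_1.map (·.2)
  let keys1 := dict_1.map (·.1)
  dict_2.foldl (fun (acc : List Int × List Int) kv =>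
      match keys1.idxOf? kv.1 with
      | none => (acc.1 ++ [0], acc.2 ++ [kv.2])
      | some i => (acc.1, acc.2.set i kv.2))
    (v1, List.replicate v1.length 0)

-- ===== PRECONDITION & SPEC =====
-- Pre_ states the dict invariant of the Python inputs: an association list stands for a
-- Python dict, whose keys are distinct; it excludes no input the Python A can receive.
def Pre_dict_to_vector (dict_1 : List (String × Int)) (dict_2 : List (String × Int)) : Prop :=
  (dict_1.map Prod.fst).Nodup ∧ (dict_2.map Prod.fst).Nodup
instance (dict_1 : List (String × Int)) (dict_2 : List (String × Int)) : Decidable (Pre_dict_to_vector dict_1 dict_2) := by unfold Pre_dict_to_vector; infer_instance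
def pvWitness_dict_to_vector : (List (String × Int)) × (List (String × Int)) :=
  ([("a", 1), ("b", 2)], [("b", 5), ("c", 7)])
def Spec_dict_to_vector (dict_1 : List (String × Int)) (dict_2 : List (String × Int)) (out : List Int × List Int) : Prop := out = dict_to_vector_alt dict_1 dict_2
instance (dict_1 : List (String × Int)) (dict_2 : List (String × Int)) (out : List Int × List Int) : Decidable (Spec_dict_to_vector dict_1 dict_2 out) := by unfold Spec_dict_to_vector; infer_instance

-- ===== CLAIM (what is proved, stated in full; the proofs are below) =====
def Claim_equal_dict_to_vector : Prop := ∀ (dict_1 : List (String × Int)) (dict_2 : List (String × Int)), Dom_dict_to_vector dict_1 dict_2 → Pre_dict_to_vector dict_1 dict_2 → Spec_dict_to_vector dict_1 dict_2 (dict_to_vector dict_1 dict_2)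

-- ===== LEMMAS AND PROOFS =====

-- proof-side view of B's in-place patching: just the set operations of the fold
def pvScatter (keys1 : List String) (a2 : List Int) (d2 : List (String × Int)) : List Int :=
  d2.foldl (fun a kv =>
    match keys1.idxOf? kv.1 with
    | none => a
    | some i => a.set i kv.2) a2

theorem pvScatter_length (keys1 : List String) :
    ∀ (d2 : List (String × Int)) (a2 : List Int),
      (pvScatter keys1 a2 d2).length = a2.length := by
  intro d2
  induction d2 with
  | nil => intro a2; rfl
  | cons kv t ih =>
    intro a2
    simp only [pvScatter, List.foldl_cons]
    cases h : keys1.idxOf? kv.1 <;> simp [pvScatter] at ih ⊢ <;> rw [ih]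
    simp

-- A's two loops both have the shape "append f kv / g kv when p kv holds, else skip":
-- a guarded two-sided appending fold is append-of-map-of-filter.
theorem pv_foldl_two_append {α : Type} (f g : α → Int) (p : α → Bool) :
    ∀ (l : List α) (acc : List Int × List Int),
      l.foldl (fun acc x => if p x then (acc.1 ++ [f x], acc.2 ++ [g x]) else acc) acc
        = (acc.1 ++ (l.filter p).map f, acc.2 ++ (l.filter p).map g) := by
  intro l
  induction l with
  | nil => intro acc; simp
  | cons h t ih =>
    intro acc
    simp only [List.foldl_cons, List.filter_cons]
    cases hp : p h <;> simp [ih]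

-- membership test "k in dict" vs lookup success
theorem pv_lookup_isSome (l : List (String × Int)) (k : String) :
    (List.lookup k l).isSome = (l.map (·.1)).contains k := by
  induction l with
  | nil => rfl
  | cons h t ih =>
    simp only [List.lookup, List.map, List.contains_cons]
    cases hk : (k == h.1) <;> simp_all

theorem pv_lookup_eq_none (l : List (String × Int)) (k : String)
    (h : k ∉ l.map Prod.fst) : List.lookup k l = none := by
  induction l with
  | nil => rfl
  | cons kv t ih =>
    simp only [List.map_cons, List.mem_cons, not_or] at h
    simp only [List.lookup]
    have : (k == kv.1) = false := by simpa using h.1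
    rw [this]
    exact ih h.2

theorem pv_lookup_mem (l : List (String × Int)) (kv : String × Int)
    (hnd : (l.map Prod.fst).Nodup) (hmem : kv ∈ l) : List.lookup kv.1 l = some kv.2 := by
  induction l with
  | nil => simp at hmem
  | cons h t ih =>
    simp only [List.map_cons, List.nodup_cons] at hnd
    rcases List.mem_cons.mp hmem with heq | hmem'
    · subst heq; simp [List.lookup]
    · have hne : (kv.1 == h.1) = false := by
        by_contra hb
        have : kv.1 = h.1 := by
          cases hx : (kv.1 == h.1)
          · exact absurd hx hb
          · exact beq_iff_eq.mp hx
        exact hnd.1 (this ▸ List.mem_map_of_mem hmem')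
      simp only [List.lookup, hne]
      exact ih hnd.2 hmem'

-- characterization of B's fold: the appended suffixes separate from the patched core
theorem pv_B_fold (keys1 : List String) :
    ∀ (d2 : List (String × Int)) (a1 a2 w : List Int), a2.length = keys1.length →
      d2.foldl (fun (acc : List Int × List Int) kv =>
          match keys1.idxOf? kv.1 with
          | none => (acc.1 ++ [0], acc.2 ++ [kv.2])
          | some i => (acc.1, acc.2.set i kv.2)) (a1, a2 ++ w)
        = (a1 ++ (d2.filter (fun kv => !keys1.contains kv.1)).map (fun _ => 0),
           pvScatter keys1 a2 d2 ++ w ++ (d2.filter (fun kv => !keys1.contains kv.1)).map (·.2)) := by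
  intro d2
  induction d2 with
  | nil => intro a1 a2 w _; simp [pvScatter]
  | cons kv t ih =>
    intro a1 a2 w hlen
    simp only [List.foldl_cons, List.filter_cons]
    cases h : keys1.idxOf? kv.1 with
    | none =>
      have hmem : kv.1 ∉ keys1 := List.idxOf?_eq_none_iff.mp h
      have hc : (!keys1.contains kv.1) = true := by simpa using hmem
      simp only [hc, if_true]
      have := ih (a1 ++ [0]) a2 (w ++ [kv.2]) hlen
      simp only [List.append_assoc] at this ⊢
      rw [this]
      simp [pvScatter, List.foldl_cons, h]
    | some i =>
      obtain ⟨hi, hki, -⟩ := List.idxOf?_eq_some_iff.mp h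
      have hmem : kv.1 ∈ keys1 := hki ▸ List.getElem_mem hi
      have hc : (!keys1.contains kv.1) = false := by simpa using hmem
      simp only [hc, Bool.false_eq_true, if_false]
      have hset : (a2 ++ w).set i kv.2 = a2.set i kv.2 ++ w := by
        rw [List.set_append, if_pos (hlen ▸ hi)]
      rw [hset]
      have := ih a1 (a2.set i kv.2) w (by simp [hlen])
      rw [this]
      simp [pvScatter, List.foldl_cons, h]

-- value of the patched core at each slot: the (unique) dict_2 value for that key, else 0
theorem pv_scatter_getD (keys1 : List String) (hk : keys1.Nodup) :
    ∀ (d2 : List (String × Int)), (d2.map Prod.fst).Nodup →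
      ∀ (a2 : List Int), a2.length = keys1.length →
        ∀ (j : ℕ) (hj : j < keys1.length),
          (pvScatter keys1 a2 d2).getD j 0
            = (List.lookup (keys1[j]'hj) d2).getD (a2.getD j 0) := by
  intro d2
  induction d2 with
  | nil => intro _ a2 _ j hj; simp [pvScatter, List.lookup]
  | cons kv t ih =>
    intro hnd a2 hlen j hj
    simp only [List.map_cons, List.nodup_cons] at hnd
    have hja : j < a2.length := hlen ▸ hj
    cases h : keys1.idxOf? kv.1 with
    | none =>
      have hmem : kv.1 ∉ keys1 := List.idxOf?_eq_none_iff.mp h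
      have hne : ((keys1[j]'hj) == kv.1) = false := by
        by_contra hb
        have : (keys1[j]'hj) = kv.1 := by
          cases hx : ((keys1[j]'hj) == kv.1)
          · exact absurd hx hb
          · exact beq_iff_eq.mp hx
        exact hmem (this ▸ List.getElem_mem hj)
      simp only [pvScatter, List.foldl_cons, h, List.lookup, hne]
      exact ih hnd.2 a2 hlen j hj
    | some i =>
      obtain ⟨hi, hki, -⟩ := List.idxOf?_eq_some_iff.mp h
      simp only [pvScatter, List.foldl_cons, h]
      by_cases heq : (keys1[j]'hj) = kv.1
      · have hij : i = j := by
          have : (keys1[i]'hi) = (keys1[j]'hj) := by rw [hki, heq]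
          exact (List.Nodup.getElem_inj_iff hk).mp this
        subst hij
        have hbeq : ((keys1[i]'hi) == kv.1) = true := by simpa using heq
        simp only [List.lookup, hbeq]
        have hnone : List.lookup (keys1[i]'hi) t = none := by
          apply pv_lookup_eq_none
          rw [heq]; exact hnd.1
        have := ih hnd.2 (a2.set i kv.2) (by simp [hlen]) i hi
        simp only [pvScatter] at this
        rw [this, hnone]
        simp only [Option.getD_none, Option.getD_some]
        rw [List.getD_eq_getElem _ _ (by simpa using hja)]
        exact List.getElem_set_self _
      · have hij : i ≠ j := by rintro rfl; exact heq hki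
        have hbeq : ((keys1[j]'hj) == kv.1) = false := by simpa using heq
        simp only [List.lookup, hbeq]
        have := ih hnd.2 (a2.set i kv.2) (by simp [hlen]) j hj
        simp only [pvScatter] at this
        rw [this]
        congr 1
        rw [List.getD_eq_getElem _ _ (by simpa using hja),
            List.getD_eq_getElem _ _ hja]
        exact List.getElem_set_ne hij _

-- ===== VERDICT (by name: the statement is the Claim_ definition above) =====
theorem dict_to_vector_spec : Claim_equal_dict_to_vector := by
  intro d1 d2 _ hpre
  obtain ⟨hnd1, hnd2⟩ := hpre
  unfold Spec_dict_to_vector dict_to_vector dict_to_vector_alt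
  -- rewrite A's two loops as append-of-map-of-filter
  have h1 : (fun (acc : List Int × List Int) (kv : String × Int) =>
        let v1 := acc.1 ++ [(List.lookup kv.1 d1).getD 0]
        if (List.lookup kv.1 d2).isSome then
          (v1, acc.2 ++ [(List.lookup kv.1 d2).getD 0])
        else (v1, acc.2 ++ [0]))
      = (fun (acc : List Int × List Int) kv =>
          if (fun (_ : String × Int) => true) kv then
            (acc.1 ++ [(List.lookup kv.1 d1).getD 0], acc.2 ++ [(List.lookup kv.1 d2).getD 0])
          else acc) := by
    funext acc kv
    cases ho : List.lookup kv.1 d2 <;> simp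
  rw [h1, pv_foldl_two_append (fun kv => (List.lookup kv.1 d1).getD 0)
        (fun kv => (List.lookup kv.1 d2).getD 0) (fun _ => true) d1 ([], [])]
  have h2 : (fun (acc : List Int × List Int) (kv : String × Int) =>
        if (List.lookup kv.1 d1).isSome then acc
        else (acc.1 ++ [0], acc.2 ++ [(List.lookup kv.1 d2).getD 0]))
      = (fun acc kv =>
          if (fun kv : String × Int => !(d1.map (·.1)).contains kv.1) kv then
            (acc.1 ++ [(fun _ : String × Int => (0 : Int)) kv],
             acc.2 ++ [(List.lookup kv.1 d2).getD 0])
          else acc) := by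
    funext acc kv
    rw [pv_lookup_isSome]
    cases hc : (d1.map (·.1)).contains kv.1 <;>
      simp only [hc, Bool.not_true, Bool.not_false, if_true, if_false, Bool.false_eq_true]
  rw [h2, pv_foldl_two_append (fun _ => (0 : Int)) (fun kv => (List.lookup kv.1 d2).getD 0)
        (fun kv : String × Int => !(d1.map (·.1)).contains kv.1) d2]
  simp only [List.filter_true, List.nil_append]
  -- rewrite B's fold via pv_B_fold (with empty appended suffix)
  have hlen : (List.replicate (d1.map (·.2)).length (0 : Int)).length = (d1.map (·.1)).length := by
    simp
  have hB := pv_B_fold (d1.map (·.1)) d2 (d1.map (·.2))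
    (List.replicate (d1.map (·.2)).length 0) [] hlen
  simp only [List.append_nil] at hB
  rw [hB]
  -- now compare the four pieces
  have hnd1' : (d1.map (·.1)).Nodup := hnd1
  rw [Prod.mk.injEq]
  constructor
  · -- first components
    congr 1
    apply List.map_congr_left
    intro kv hkv
    rw [pv_lookup_mem d1 kv hnd1 hkv]
    rfl
  · -- second components
    congr 1
    · -- patched core = d1.map (fun kv => (lookup kv.1 d2).getD 0)
      apply List.ext_getElem
      · rw [pvScatter_length]; simp
      · intro j hj1 hj2
        have hjk : j < (d1.map (·.1)).length := by simpa using hj1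
        have hsc := pv_scatter_getD (d1.map (·.1)) hnd1' d2 hnd2
          (List.replicate (d1.map (·.2)).length 0) hlen j hjk
        have hrep : (List.replicate (d1.map (·.2)).length (0 : Int)).getD j 0 = 0 := by
          rw [List.getD_eq_getElem _ _ (by simpa using hjk)]
          simp
        rw [← List.getD_eq_getElem _ 0 hj2, hsc, hrep]
        simp only [List.getElem_map]
    · -- appended suffixes
      apply List.map_congr_left
      intro kv hkv
      have hmem : kv ∈ d2 := List.mem_of_mem_filter hkv
      rw [pv_lookup_mem d2 kv hnd2 hmem]
      rfl
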